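-- pv_equiv track=rewrite | github.com/lmammino/rust-advent | y2021/ex19/helpers.py | rotations
-- ===== SOURCE A (Python) =====
-- def rotations(scanner):
--     x,y,z = zip(*scanner)
--
--     yield (tuple(zip(x,y,z)))
--     yield (tuple(zip(x,z,y)))
--     yield (tuple(zip(y,x,z)))
--     yield (tuple(zip(y,z,x)))
--     yield (tuple(zip(z,x,y)))
--     yield (tuple(zip(z,y,x)))
--
--     z = [-a for a in z]
--     yield (tuple(zip(x,y,z)))
--     yield (tuple(zip(x,z,y)))
--     yield (tuple(zip(y,x,z)))
--     yield (tuple(zip(y,z,x)))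
--     yield (tuple(zip(z,x,y)))
--     yield (tuple(zip(z,y,x)))
--
--     z = [-a for a in z]
--     y = [-a for a in y]
--     yield (tuple(zip(x,y,z)))
--     yield (tuple(zip(x,z,y)))
--     yield (tuple(zip(y,x,z)))
--     yield (tuple(zip(y,z,x)))
--     yield (tuple(zip(z,x,y)))
--     yield (tuple(zip(z,y,x)))
--
--     z = [-a for a in z]
--     yield (tuple(zip(x,y,z)))
--     yield (tuple(zip(x,z,y)))
--     yield (tuple(zip(y,x,z)))
--     yield (tuple(zip(y,z,x)))
--     yield (tuple(zip(z,x,y)))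
--     yield (tuple(zip(z,y,x)))
--
--     x = [-a for a in x]
--     yield (tuple(zip(x,y,z)))
--     yield (tuple(zip(x,z,y)))
--     yield (tuple(zip(y,x,z)))
--     yield (tuple(zip(y,z,x)))
--     yield (tuple(zip(z,x,y)))
--     yield (tuple(zip(z,y,x)))
--
--     z = [-a for a in z]
--     yield (tuple(zip(x,y,z)))
--     yield (tuple(zip(x,z,y)))
--     yield (tuple(zip(y,x,z)))
--     yield (tuple(zip(y,z,x)))
--     yield (tuple(zip(z,x,y)))
--     yield (tuple(zip(z,y,x)))
--
--     z = [-a for a in z]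
--     y = [-a for a in y]
--     yield (tuple(zip(x,y,z)))
--     yield (tuple(zip(x,z,y)))
--     yield (tuple(zip(y,x,z)))
--     yield (tuple(zip(y,z,x)))
--     yield (tuple(zip(z,x,y)))
--     yield (tuple(zip(z,y,x)))
--
--     z = [-a for a in z]
--     yield (tuple(zip(x,y,z)))
--     yield (tuple(zip(x,z,y)))
--     yield (tuple(zip(y,x,z)))
--     yield (tuple(zip(y,z,x)))
--     yield (tuple(zip(z,x,y)))
--     yield (tuple(zip(z,y,x)))
-- ===== SOURCE B (Python) =====
-- def _variants(p):
--     """The 48 images of a single point, in A's emission order (sign-major, then permutation)."""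
--     x, y, z = p
--     out = []
--     for sx, sy, sz in ((1, 1, 1), (1, 1, -1), (1, -1, 1), (1, -1, -1),
--                        (-1, -1, -1), (-1, -1, 1), (-1, 1, -1), (-1, 1, 1)):
--         a, b, c = sx * x, sy * y, sz * z
--         out += [(a, b, c), (a, c, b), (b, a, c), (b, c, a), (c, a, b), (c, b, a)]
--     return out
--
--
-- def rotations(scanner):
--     # point-major: compute every point's 48 images, then transpose back to 48 point-lists
--     per_point = [_variants(p) for p in scanner]
--     yield from zip(*per_point)
-- ===== Notes on version B (the rewrite author's own statement) =====
-- stated objective: alternative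
-- what changed: Point-major instead of column-major: B computes the 48 images of each point individually and transposes with zip(*...), replacing A's column unzip and 48 unrolled re-zips of incrementally negated columns.
-- outside the precondition, e.g. on rotations([]): A raises ValueError, B returns []
import Mathlib
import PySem

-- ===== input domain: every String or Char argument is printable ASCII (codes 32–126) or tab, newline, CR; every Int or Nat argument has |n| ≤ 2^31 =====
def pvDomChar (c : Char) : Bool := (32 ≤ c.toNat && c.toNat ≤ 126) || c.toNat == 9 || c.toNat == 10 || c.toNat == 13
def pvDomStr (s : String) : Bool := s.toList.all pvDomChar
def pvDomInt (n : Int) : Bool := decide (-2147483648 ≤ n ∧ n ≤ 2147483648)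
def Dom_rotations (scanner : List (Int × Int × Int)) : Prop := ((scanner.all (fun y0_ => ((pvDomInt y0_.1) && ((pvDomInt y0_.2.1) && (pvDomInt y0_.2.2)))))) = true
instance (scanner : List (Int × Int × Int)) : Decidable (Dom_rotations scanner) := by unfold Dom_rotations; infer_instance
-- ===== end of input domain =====

-- B is point-major: it computes the 48 images of each point and transposes with zip(*…),
-- instead of A's column unzip with 48 unrolled re-zips of incrementally negated columns
-- (objective: alternative; on the empty input, outside Pre_, A raises ValueError while B returns []).

-- zip of three lists, exactly Python's zip(a,b,c)
def pvZip3 : List Int → List Int → List Int → List (Int × Int × Int)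
  | a :: as, b :: bs, c :: cs => (a, b, c) :: pvZip3 as bs cs
  | _, _, _ => []

-- ===== PORT A =====
def rotations (scanner : List (Int × Int × Int)) : List (List (Int × Int × Int)) :=
  let x := scanner.map (fun p => p.1)
  let y := scanner.map (fun p => p.2.1)
  let z := scanner.map (fun p => p.2.2)
  [pvZip3 x y z, pvZip3 x z y, pvZip3 y x z, pvZip3 y z x, pvZip3 z x y, pvZip3 z y x] ++
  (let z := z.map (fun a => -a)
   [pvZip3 x y z, pvZip3 x z y, pvZip3 y x z, pvZip3 y z x, pvZip3 z x y, pvZip3 z y x] ++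
   (let z := z.map (fun a => -a)
    let y := y.map (fun a => -a)
    [pvZip3 x y z, pvZip3 x z y, pvZip3 y x z, pvZip3 y z x, pvZip3 z x y, pvZip3 z y x] ++
    (let z := z.map (fun a => -a)
     [pvZip3 x y z, pvZip3 x z y, pvZip3 y x z, pvZip3 y z x, pvZip3 z x y, pvZip3 z y x] ++
     (let x := x.map (fun a => -a)
      [pvZip3 x y z, pvZip3 x z y, pvZip3 y x z, pvZip3 y z x, pvZip3 z x y, pvZip3 z y x] ++
      (let z := z.map (fun a => -a)
       [pvZip3 x y z, pvZip3 x z y, pvZip3 y x z, pvZip3 y z x, pvZip3 z x y, pvZip3 z y x] ++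
       (let z := z.map (fun a => -a)
        let y := y.map (fun a => -a)
        [pvZip3 x y z, pvZip3 x z y, pvZip3 y x z, pvZip3 y z x, pvZip3 z x y, pvZip3 z y x] ++
        (let z := z.map (fun a => -a)
         [pvZip3 x y z, pvZip3 x z y, pvZip3 y x z, pvZip3 y z x, pvZip3 z x y, pvZip3 z y x])))))))

-- ===== PORT B =====
-- the 48 images of one point, in emission order (sign-major, then permutation) — Source B's _variants
def pvVariants (p : Int × Int × Int) : List (Int × Int × Int) :=
  ([(1, 1, 1), (1, 1, -1), (1, -1, 1), (1, -1, -1),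
    (-1, -1, -1), (-1, -1, 1), (-1, 1, -1), (-1, 1, 1)] :
      List (Int × Int × Int)).flatMap (fun s =>
    let a := s.1 * p.1
    let b := s.2.1 * p.2.1
    let c := s.2.2 * p.2.2
    [(a, b, c), (a, c, b), (b, a, c), (b, c, a), (c, a, b), (c, b, a)])

-- hand port of Python's zip(*rows) (stops at the shortest row; zip() of no rows is empty)
def pvHeadsTails {α : Type} : List (List α) → Option (List α × List (List α))
  | [] => some ([], [])
  | [] :: _ => none
  | (a :: as) :: rest => (pvHeadsTails rest).map (fun ht => (a :: ht.1, as :: ht.2))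

def pvZipStarGo {α : Type} : List α → List (List α) → List (List α)
  | [], _ => []
  | a :: as, rest =>
    match pvHeadsTails rest with
    | none => []
    | some (hs, ts) => (a :: hs) :: pvZipStarGo as ts

def pvZipStar {α : Type} : List (List α) → List (List α)
  | [] => []
  | l :: rest => pvZipStarGo l rest

def rotations_alt (scanner : List (Int × Int × Int)) : List (List (Int × Int × Int)) :=
  pvZipStar (scanner.map pvVariants)

-- ===== PRECONDITION & SPEC =====
-- Pre_ excludes only the empty list, on which the Python A's unpacking of zip(*scanner)
-- raises ValueError (B naturally yields nothing, i.e. returns [] there).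
def Pre_rotations (scanner : List (Int × Int × Int)) : Prop := scanner ≠ []
instance (scanner : List (Int × Int × Int)) : Decidable (Pre_rotations scanner) := by unfold Pre_rotations; infer_instance
def pvWitness_rotations : (List (Int × Int × Int)) := [(1, 2, 3)]

def Spec_rotations (scanner : List (Int × Int × Int)) (out : List (List (Int × Int × Int))) : Prop := out = rotations_alt scanner
instance (scanner : List (Int × Int × Int)) (out : List (List (Int × Int × Int))) : Decidable (Spec_rotations scanner out) := by unfold Spec_rotations; infer_instance

-- ===== CLAIM (what is proved, stated in full; the proofs are below) =====
def Claim_equal_rotations : Prop := ∀ (scanner : List (Int × Int × Int)), Dom_rotations scanner → Pre_rotations scanner → Spec_rotations scanner (rotations scanner)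

-- ===== LEMMAS AND PROOFS =====

theorem pvZip3_map {α : Type} (f g h : α → Int) (l : List α) :
    pvZip3 (l.map f) (l.map g) (l.map h) = l.map (fun a => (f a, g a, h a)) := by
  induction l with
  | nil => rfl
  | cons a t ih => simp [pvZip3, ih]

theorem pvHeadsTails_map {α β : Type} (f : α → β) (r : α → List β) (ps : List α) :
    pvHeadsTails (ps.map (fun p => f p :: r p)) = some (ps.map f, ps.map r) := by
  induction ps with
  | nil => rfl
  | cons p t ih => simp [pvHeadsTails, ih]

theorem pvZipStarGo_rows {α β : Type} (gs : List (α → β)) (p0 : α) (ps : List α) :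
    pvZipStarGo (gs.map (fun g => g p0)) (ps.map (fun p => gs.map (fun g => g p)))
      = gs.map (fun g => (p0 :: ps).map g) := by
  induction gs generalizing ps with
  | nil => rfl
  | cons g gs ih =>
    simp only [List.map_cons, pvZipStarGo, pvHeadsTails_map]
    simp [ih]

theorem pvZipStar_rows {α β : Type} (gs : List (α → β)) (ps : List α) (hps : ps ≠ []) :
    pvZipStar (ps.map (fun p => gs.map (fun g => g p)))
      = gs.map (fun g => ps.map g) := by
  cases ps with
  | nil => exact absurd rfl hps
  | cons p0 ps =>
    simp only [List.map_cons, pvZipStar]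
    have h := pvZipStarGo_rows gs p0 ps
    simp only [List.map_cons] at h
    exact h

-- the 48 per-point transformation functions, sign-major then permutation
def pvGs : List ((Int × Int × Int) → (Int × Int × Int)) :=
  ([(1, 1, 1), (1, 1, -1), (1, -1, 1), (1, -1, -1),
    (-1, -1, -1), (-1, -1, 1), (-1, 1, -1), (-1, 1, 1)] :
      List (Int × Int × Int)).flatMap (fun s =>
    [fun p => (s.1 * p.1, s.2.1 * p.2.1, s.2.2 * p.2.2),
     fun p => (s.1 * p.1, s.2.2 * p.2.2, s.2.1 * p.2.1),
     fun p => (s.2.1 * p.2.1, s.1 * p.1, s.2.2 * p.2.2),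
     fun p => (s.2.1 * p.2.1, s.2.2 * p.2.2, s.1 * p.1),
     fun p => (s.2.2 * p.2.2, s.1 * p.1, s.2.1 * p.2.1),
     fun p => (s.2.2 * p.2.2, s.2.1 * p.2.1, s.1 * p.1)])

theorem pvVariants_eq (p : Int × Int × Int) :
    pvVariants p = pvGs.map (fun g => g p) := by
  rfl

-- ===== VERDICT (by name: the statement is the Claim_ definition above) =====
theorem rotations_spec : Claim_equal_rotations := by
  intro scanner _ hpre
  unfold Spec_rotations rotations rotations_alt
  have hb : pvZipStar (scanner.map pvVariants)
      = pvGs.map (fun g => scanner.map g) := by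
    have : scanner.map pvVariants
        = scanner.map (fun p => pvGs.map (fun g => g p)) := by
      simp [pvVariants_eq]
    rw [this, pvZipStar_rows _ _ hpre]
  rw [hb]
  simp only [List.map_map, Function.comp_def, pvGs, List.flatMap_cons, List.flatMap_nil,
    List.append_nil, List.map_cons, List.map_nil, List.cons_append, List.nil_append]
  simp [pvZip3_map, neg_mul, one_mul, neg_neg]
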